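-- pv_equiv track=rewrite | github.com/NanMinuk/FinGraph-Analyst | app/legacy/nodes_backup.py | generate_key_points_from_graph_relations
-- ===== SOURCE A (Python) =====
-- def generate_key_points_from_graph_relations(graph_relations):
--     key_points = []
--
--     for rel in graph_relations:
--         head = rel.get("head", "해당 기업")
--         relation = rel.get("relation", "")
--         tail = rel.get("tail", "이벤트")
--
--         if relation == "benefits_from":
--             key_points.append(
--                 f"{head}는 {tail} 이벤트와 연결되어 긍정적 모멘텀 가능성이 있습니다."
--             )
--         elif relation == "reports":
--             key_points.append(
--                 f"{head}는 {tail} 관련 이벤트와 연결되어 실적 흐름을 점검할 필요가 있습니다."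
--             )
--         elif relation == "supplies":
--             key_points.append(
--                 f"{head}는 {tail} 관련 공급 이슈와 연결되어 공급 확대 흐름을 확인할 필요가 있습니다."
--             )
--         elif relation == "invests_in":
--             key_points.append(
--                 f"{head}는 {tail} 관련 투자 움직임과 연결되어 중장기 성장 포인트로 볼 수 있습니다."
--             )
--         else:
--             key_points.append(
--                 f"{head}는 {tail} 이벤트와 연결되어 추가 확인이 필요한 상태입니다."
--             )
--
--     # 중복 제거
--     unique_key_points = list(dict.fromkeys(key_points))
--     return unique_key_points[:3]
-- ===== SOURCE B (Python) =====
-- def generate_key_points_from_graph_relations(graph_relations):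
--     templates = {
--         "benefits_from": "{h}는 {t} 이벤트와 연결되어 긍정적 모멘텀 가능성이 있습니다.",
--         "reports": "{h}는 {t} 관련 이벤트와 연결되어 실적 흐름을 점검할 필요가 있습니다.",
--         "supplies": "{h}는 {t} 관련 공급 이슈와 연결되어 공급 확대 흐름을 확인할 필요가 있습니다.",
--         "invests_in": "{h}는 {t} 관련 투자 움직임과 연결되어 중장기 성장 포인트로 볼 수 있습니다.",
--     }
--     default_template = "{h}는 {t} 이벤트와 연결되어 추가 확인이 필요한 상태입니다."
--     result = []
--     seen = set()
--     for rel in graph_relations: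
--         tpl = templates.get(rel.get("relation", ""), default_template)
--         s = tpl.format(h=rel.get("head", "해당 기업"), t=rel.get("tail", "이벤트"))
--         if s not in seen:
--             result.append(s)
--             if len(result) == 3:
--                 break
--             seen.add(s)
--     return result
-- ===== Notes on version B (the rewrite author's own statement) =====
-- stated objective: alternative
-- what changed: Replaces A's build-all-messages / dict.fromkeys-dedup / slice pipeline with a single streaming pass using a template table and a seen-set that stops as soon as the third unique message is produced.
import Mathlib
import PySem

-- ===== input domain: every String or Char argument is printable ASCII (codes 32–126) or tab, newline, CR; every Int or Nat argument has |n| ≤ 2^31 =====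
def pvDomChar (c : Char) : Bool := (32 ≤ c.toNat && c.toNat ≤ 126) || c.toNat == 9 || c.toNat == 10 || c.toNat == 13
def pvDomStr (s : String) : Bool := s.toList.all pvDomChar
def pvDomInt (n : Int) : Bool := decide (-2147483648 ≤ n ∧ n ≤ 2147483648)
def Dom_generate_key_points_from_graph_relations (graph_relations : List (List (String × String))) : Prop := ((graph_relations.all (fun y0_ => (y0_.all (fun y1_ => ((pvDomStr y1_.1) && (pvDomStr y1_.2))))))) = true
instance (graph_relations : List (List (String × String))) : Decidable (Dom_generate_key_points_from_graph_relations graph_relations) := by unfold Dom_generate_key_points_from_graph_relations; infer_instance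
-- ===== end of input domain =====

-- B replaces A's build-all / dedup / slice pipeline by one streaming pass (template table +
-- seen-set) that stops at the third unique message; equivalence of the return value is proved.

-- ===== PORT A =====
-- message built by A's if/elif chain for one relation dict
def pvMsgA (rel : List (String × String)) : String :=
  let d := PySem.Dict.mk rel
  let head := d.getD "head" "해당 기업"
  let relation := d.getD "relation" ""
  let tail := d.getD "tail" "이벤트"
  if relation == "benefits_from" then
    head ++ "는 " ++ tail ++ " 이벤트와 연결되어 긍정적 모멘텀 가능성이 있습니다."
  else if relation == "reports" then
    head ++ "는 " ++ tail ++ " 관련 이벤트와 연결되어 실적 흐름을 점검할 필요가 있습니다."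
  else if relation == "supplies" then
    head ++ "는 " ++ tail ++ " 관련 공급 이슈와 연결되어 공급 확대 흐름을 확인할 필요가 있습니다."
  else if relation == "invests_in" then
    head ++ "는 " ++ tail ++ " 관련 투자 움직임과 연결되어 중장기 성장 포인트로 볼 수 있습니다."
  else
    head ++ "는 " ++ tail ++ " 이벤트와 연결되어 추가 확인이 필요한 상태입니다."

def generate_key_points_from_graph_relations (graph_relations : List (List (String × String))) : List String :=
  let key_points := graph_relations.foldl (fun kp rel => kp ++ [pvMsgA rel]) []
  -- list(dict.fromkeys(key_points)) is PySem.List.dedup (first occurrences, in order)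
  let unique_key_points := PySem.List.dedup key_points
  PySem.List.slice unique_key_points none (some 3)

-- ===== PORT B =====
-- templates.get(relation, default)(head, tail): the dict of format strings as a dict of closures
def pvTemplate (relation : String) : String → String → String :=
  PySem.Dict.getD (PySem.Dict.mk
    [ ("benefits_from", fun h t => h ++ "는 " ++ t ++ " 이벤트와 연결되어 긍정적 모멘텀 가능성이 있습니다.")
    , ("reports",       fun h t => h ++ "는 " ++ t ++ " 관련 이벤트와 연결되어 실적 흐름을 점검할 필요가 있습니다.")
    , ("supplies",      fun h t => h ++ "는 " ++ t ++ " 관련 공급 이슈와 연결되어 공급 확대 흐름을 확인할 필요가 있습니다.")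
    , ("invests_in",    fun h t => h ++ "는 " ++ t ++ " 관련 투자 움직임과 연결되어 중장기 성장 포인트로 볼 수 있습니다.") ])
    relation
    (fun h t => h ++ "는 " ++ t ++ " 이벤트와 연결되어 추가 확인이 필요한 상태입니다.")

-- the formatted message for one relation dict, as Source B computes it
def pvMsgB (rel : List (String × String)) : String :=
  let d := PySem.Dict.mk rel
  pvTemplate (d.getD "relation" "") (d.getD "head" "해당 기업") (d.getD "tail" "이벤트")

-- the streaming loop: append unseen messages, break once the result holds 3
def pvLoopB : List (List (String × String)) → PySem.Set String → List String → List String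
  | [], _, result => result
  | rel :: rest, seen, result =>
    let s := pvMsgB rel
    if PySem.Set.contains seen s then
      pvLoopB rest seen result
    else
      let result' := result ++ [s]
      if result'.length == 3 then result'
      else pvLoopB rest (PySem.Set.add seen s) result'

def generate_key_points_from_graph_relations_alt (graph_relations : List (List (String × String))) : List String :=
  pvLoopB graph_relations PySem.Set.empty []

-- ===== PRECONDITION & SPEC =====
def Spec_generate_key_points_from_graph_relations (graph_relations : List (List (String × String))) (out : List String) : Prop := out = generate_key_points_from_graph_relations_alt graph_relations
instance (graph_relations : List (List (String × String))) (out : List String) : Decidable (Spec_generate_key_points_from_graph_relations graph_relations out) := by unfold Spec_generate_key_points_from_graph_relations; infer_instance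

-- ===== CLAIM (what is proved, stated in full; the proofs are below) =====
def Claim_equal_generate_key_points_from_graph_relations : Prop := ∀ (graph_relations : List (List (String × String))), Dom_generate_key_points_from_graph_relations graph_relations → Spec_generate_key_points_from_graph_relations graph_relations (generate_key_points_from_graph_relations graph_relations)

-- ===== LEMMAS AND PROOFS =====

-- ordered first-occurrence dedup, excluding anything already in `seen`
def pvDedupFrom (seen : List String) : List String → List String
  | [] => []
  | x :: xs => if x ∈ seen then pvDedupFrom seen xs else x :: pvDedupFrom (x :: seen) xs

lemma pvMsgB_eq_pvMsgA (rel : List (String × String)) : pvMsgB rel = pvMsgA rel := by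
  unfold pvMsgB pvMsgA pvTemplate
  simp only [PySem.Dict.getD, PySem.Dict.get?_mk_cons]
  generalize ((PySem.Dict.mk rel).get? "relation").getD "" = r
  by_cases h1 : r = "benefits_from"
  · subst h1; simp
  by_cases h2 : r = "reports"
  · subst h2; simp
  by_cases h3 : r = "supplies"
  · subst h3; simp
  by_cases h4 : r = "invests_in"
  · subst h4; simp
  simp [PySem.Dict.get?, beq_iff_eq, h1, h2, h3, h4, Ne.symm h1, Ne.symm h2, Ne.symm h3, Ne.symm h4]

lemma pvDedupFrom_congr (s t : List String) (h : ∀ a, a ∈ s ↔ a ∈ t) (xs : List String) :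
    pvDedupFrom s xs = pvDedupFrom t xs := by
  induction xs generalizing s t with
  | nil => rfl
  | cons x xs ih =>
    simp only [pvDedupFrom]
    by_cases hx : x ∈ s
    · rw [if_pos hx, if_pos ((h x).mp hx)]; exact ih s t h
    · rw [if_neg hx, if_neg (fun hxt => hx ((h x).mpr hxt))]
      exact congrArg _ (ih (x :: s) (x :: t) (by simp [h]))

lemma foldl_add_eq_dedupFrom (xs : List String) : ∀ (s : List String),
    List.foldl PySem.Set.add s xs = s ++ pvDedupFrom s xs := by
  induction xs with
  | nil => intro s; simp [pvDedupFrom]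
  | cons x xs ih =>
    intro s
    simp only [List.foldl_cons, pvDedupFrom]
    by_cases hx : x ∈ s
    · rw [PySem.Set.add_of_mem hx, if_pos hx, ih s]
    · rw [PySem.Set.add_of_not_mem hx, if_neg hx, ih (s ++ [x]),
        pvDedupFrom_congr (s ++ [x]) (x :: s) (by simp [or_comm]) xs]
      simp

lemma dedup_eq_dedupFrom (xs : List String) : PySem.List.dedup xs = pvDedupFrom [] xs := by
  have : PySem.List.dedup xs = List.foldl PySem.Set.add [] xs := by
    simp only [PySem.List.dedup_eq_ofList]
    rfl
  rw [this, foldl_add_eq_dedupFrom]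
  simp

lemma pvLoopB_eq (rels : List (List (String × String))) : ∀ (seen res : List String),
    res.length < 3 →
    pvLoopB rels seen res = res ++ (pvDedupFrom seen (rels.map pvMsgB)).take (3 - res.length) := by
  induction rels with
  | nil => intro seen res _; simp [pvLoopB, pvDedupFrom]
  | cons rel rest ih =>
    intro seen res hlen
    simp only [pvLoopB, List.map_cons, pvDedupFrom]
    by_cases hx : pvMsgB rel ∈ seen
    · have : PySem.Set.contains seen (pvMsgB rel) = true := (PySem.Set.contains_iff seen (pvMsgB rel)).mpr hx
      rw [if_pos this, if_pos hx, ih seen res hlen]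
    · have hc : ¬ PySem.Set.contains seen (pvMsgB rel) = true := by
        simp [hx]
      rw [if_neg hc, if_neg hx]
      by_cases h3 : (res ++ [pvMsgB rel]).length = 3
      · rw [if_pos (by simpa using h3)]
        have : 3 - res.length = 1 := by simp at h3; omega
        simp [this]
      · rw [if_neg (by simpa using h3)]
        have hlen' : (res ++ [pvMsgB rel]).length < 3 := by simp at h3 ⊢; omega
        rw [ih (PySem.Set.add seen (pvMsgB rel)) (res ++ [pvMsgB rel]) hlen',
          PySem.Set.add_of_not_mem hx,
          pvDedupFrom_congr (seen ++ [pvMsgB rel]) (pvMsgB rel :: seen) (by simp [or_comm]) _]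
        have harith : 3 - res.length = (3 - (res ++ [pvMsgB rel]).length) + 1 := by
          simp; omega
        simp [harith, List.take_succ_cons]

-- ===== VERDICT (by name: the statement is the Claim_ definition above) =====
theorem generate_key_points_from_graph_relations_spec : Claim_equal_generate_key_points_from_graph_relations := by
  intro gr _
  unfold Spec_generate_key_points_from_graph_relations
  unfold generate_key_points_from_graph_relations_alt
  dsimp only [generate_key_points_from_graph_relations]
  rw [pvLoopB_eq gr PySem.Set.empty [] (by simp)]
  rw [PySem.List.foldl_append_singleton_eq_map, dedup_eq_dedupFrom,
    PySem.List.slice_to _ (show (0:Int) ≤ 3 by norm_num)]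
  have hm : gr.map pvMsgB = gr.map pvMsgA := List.map_congr_left (fun r _ => pvMsgB_eq_pvMsgA r)
  simp [hm]
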